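-- pv_equiv track=rewrite | github.com/brics-project/brics_code_release | diffusions/contruct_trainer.py | get_layer_attns
-- ===== SOURCE A (Python) =====
-- def get_layer_attns(atten_range, total_len):
--     layer_attns = []
--
--     for i in range(1, total_len+1):
--         if i in atten_range:
--             layer_attns.append(True)
--         else:
--             layer_attns.append(False)
--
--     return tuple(layer_attns)
-- ===== SOURCE B (Python) =====
-- def get_layer_attns(atten_range, total_len):
--     layer_attns = [False] * max(total_len, 0)
--     for v in atten_range:
--         if 1 <= v <= total_len:
--             layer_attns[v - 1] = True
--     return tuple(layer_attns)
-- ===== Notes on version B (the rewrite author's own statement) =====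
-- stated objective: faster
-- what changed: Instead of scanning every index 1..total_len and testing membership in atten_range (a linear scan per index), B allocates a False array once and scatters True at position v-1 for each in-range v of atten_range, looping over atten_range only.
import Mathlib
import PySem

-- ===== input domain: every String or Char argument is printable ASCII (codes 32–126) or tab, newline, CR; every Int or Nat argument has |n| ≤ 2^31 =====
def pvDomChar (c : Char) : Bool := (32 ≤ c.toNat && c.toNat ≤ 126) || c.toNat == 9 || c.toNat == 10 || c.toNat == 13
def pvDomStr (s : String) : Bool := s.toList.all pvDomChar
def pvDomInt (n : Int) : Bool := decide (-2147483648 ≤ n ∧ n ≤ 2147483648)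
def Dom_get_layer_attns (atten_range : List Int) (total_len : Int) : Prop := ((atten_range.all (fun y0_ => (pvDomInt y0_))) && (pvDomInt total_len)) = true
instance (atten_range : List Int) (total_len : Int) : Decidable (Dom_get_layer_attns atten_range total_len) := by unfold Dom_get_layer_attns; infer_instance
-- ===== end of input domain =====

-- B scatters True into a preallocated False array (one pass over atten_range) instead of
-- testing membership for every index 1..total_len; proved to return A's exact value everywhere.

-- ===== PORT A =====
-- for i in range(1, total_len+1): append (i in atten_range); tuple() is the identity on the list value
def get_layer_attns (atten_range : List Int) (total_len : Int) : List Bool :=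
  (PySem.List.pyRange 1 (total_len + 1) 1).foldl
    (fun layer_attns i => layer_attns ++ [atten_range.contains i]) []

-- ===== PORT B =====
-- layer_attns = [False] * max(total_len, 0); scatter True at v-1 for each in-range v; tuple() is identity
def get_layer_attns_alt (atten_range : List Int) (total_len : Int) : List Bool :=
  atten_range.foldl
    (fun layer_attns v =>
      if 1 ≤ v ∧ v ≤ total_len then layer_attns.set (v - 1).toNat true else layer_attns)
    (List.replicate (max total_len 0).toNat false)

-- ===== PRECONDITION & SPEC =====
def Spec_get_layer_attns (atten_range : List Int) (total_len : Int) (out : List Bool) : Prop := out = get_layer_attns_alt atten_range total_len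
instance (atten_range : List Int) (total_len : Int) (out : List Bool) : Decidable (Spec_get_layer_attns atten_range total_len out) := by unfold Spec_get_layer_attns; infer_instance

-- ===== CLAIM (what is proved, stated in full; the proofs are below) =====
def Claim_equal_get_layer_attns : Prop := ∀ (atten_range : List Int) (total_len : Int), Dom_get_layer_attns atten_range total_len → Spec_get_layer_attns atten_range total_len (get_layer_attns atten_range total_len)

-- ===== LEMMAS AND PROOFS =====

-- A's append-loop is a map over the range
theorem foldl_append_singleton {α β : Type} (f : α → β) (l : List α) (acc : List β) :
    l.foldl (fun a i => a ++ [f i]) acc = acc ++ l.map f := by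
  induction l generalizing acc with
  | nil => simp
  | cons x xs ih => simp [List.foldl, ih]

-- the scatter loop, read back pointwise
theorem scatter_getElem? (n : Int) (l : List Int) (acc : List Bool)
    (h : acc.length = n.toNat) (j : Nat) :
    (l.foldl (fun a v => if 1 ≤ v ∧ v ≤ n then a.set (v - 1).toNat true else a) acc)[j]?
      = acc[j]?.map (fun b => b || decide (((j : Int) + 1) ∈ l)) := by
  induction l generalizing acc with
  | nil =>
    simp
  | cons v tl ih =>
    simp only [List.foldl]
    by_cases hv : 1 ≤ v ∧ v ≤ n
    · rw [if_pos hv, ih _ (by simpa using h)]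
      by_cases hj : j = (v - 1).toNat
      · subst hj
        rw [List.getElem?_set, if_pos rfl, if_pos (by omega)]
        rw [List.getElem?_eq_getElem (show (v - 1).toNat < acc.length by omega)]
        have hjv : (((v - 1).toNat : Int) + 1) = v := by omega
        have hd : decide ((((v - 1).toNat : Int) + 1) ∈ v :: tl) = true :=
          decide_eq_true (List.mem_cons.mpr (Or.inl hjv))
        simp only [Option.map_some, Bool.true_or, hd, Bool.or_true]
      · rw [List.getElem?_set, if_neg (fun hh => hj hh.symm)]
        have hjv : (j : Int) + 1 ≠ v := by omega
        simp [List.mem_cons, hjv]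
    · rw [if_neg hv, ih _ h]
      by_cases hjlt : j < acc.length
      · have hjv : (j : Int) + 1 ≠ v := by omega
        simp [List.mem_cons, hjv]
      · rw [List.getElem?_eq_none (show acc.length ≤ j by omega)]
        rfl

theorem get_layer_attns_eq (atten_range : List Int) (total_len : Int) :
    get_layer_attns atten_range total_len = get_layer_attns_alt atten_range total_len := by
  unfold get_layer_attns get_layer_attns_alt
  rw [foldl_append_singleton]
  apply List.ext_getElem?
  intro j
  rw [scatter_getElem? total_len atten_range _ (by simp; omega) j]
  by_cases hj : j < (max total_len 0).toNat
  · rw [List.getElem?_eq_getElem (l := List.replicate _ false) (by simpa using hj)]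
    rw [List.getElem?_eq_getElem (by
      simp only [List.nil_append, List.length_map, PySem.List.length_pyRange_one]
      omega)]
    simp only [List.nil_append, List.getElem_map, PySem.List.getElem_pyRange_one,
      List.getElem_replicate, Bool.false_or, Option.map_some]
    have hc : (1 : Int) + (j : Int) = (j : Int) + 1 := by omega
    rw [hc]
    simp
  · have h2 : ([] ++ List.map atten_range.contains (PySem.List.pyRange 1 (total_len + 1) 1)).length ≤ j := by
      simp only [List.nil_append, List.length_map, PySem.List.length_pyRange_one]
      omega
    have h3 : (List.replicate (max total_len 0).toNat false).length ≤ j := by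
      simpa using hj
    rw [List.getElem?_eq_none h3, List.getElem?_eq_none h2]
    rfl

-- ===== VERDICT (by name: the statement is the Claim_ definition above) =====
theorem get_layer_attns_spec : Claim_equal_get_layer_attns := by
  intro atten_range total_len _
  unfold Spec_get_layer_attns
  exact get_layer_attns_eq atten_range total_len
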